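-- pv_equiv track=rewrite | github.com/rozyczko/pycrysfml2008 | scripts/permutations_optional_args/permute_kwargs.py | generate_code_snippet
-- ===== SOURCE A (Python) =====
-- import itertools
--
-- def generate_code_snippet(codes: list, subroutine_name: str, subroutine_arguments: str):
--     l = [False, True]
--     iter = list(itertools.product(l, repeat=len(codes)))
--     code_section = ""
--     for combo in iter:
--         tmp = ' .and. '.join([f"{code}" if combo[i] else f".not. {code}" for i, code in enumerate(codes)])
--         conditional_statement = f"else if ({tmp}) then"
--         subroutine_kwargs = ','.join([f"{code.replace('is_', '')}={code.replace('is_', '')}" for i, code in enumerate(codes) if combo[i]])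
--
--         code_section += f"{conditional_statement}\n    call {subroutine_name}({subroutine_arguments},{subroutine_kwargs},kout=kout)\n"
--
--     return code_section
-- ===== SOURCE B (Python) =====
-- def generate_code_snippet(codes: list, subroutine_name: str, subroutine_arguments: str):
--     def emit(conds, kwargs):
--         return (f"else if ({' .and. '.join(conds)}) then\n"
--                 f"    call {subroutine_name}({subroutine_arguments},{','.join(kwargs)},kout=kout)\n")
--
--     def walk(i, conds, kwargs):
--         if i == len(codes):
--             return emit(conds, kwargs)
--         code = codes[i]
--         stripped = code.replace('is_', '')
--         return (walk(i + 1, conds + [f".not. {code}"], kwargs)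
--                 + walk(i + 1, conds + [f"{code}"], kwargs + [f"{stripped}={stripped}"]))
--
--     return walk(0, [], [])
-- ===== Notes on version B (the rewrite author's own statement) =====
-- stated objective: alternative
-- what changed: Replaced the materialised itertools.product table plus two per-combo enumerate passes with a single recursion over the codes list that carries accumulated condition terms and kwarg fragments, emitting each branch line at the leaves.
import Mathlib
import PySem

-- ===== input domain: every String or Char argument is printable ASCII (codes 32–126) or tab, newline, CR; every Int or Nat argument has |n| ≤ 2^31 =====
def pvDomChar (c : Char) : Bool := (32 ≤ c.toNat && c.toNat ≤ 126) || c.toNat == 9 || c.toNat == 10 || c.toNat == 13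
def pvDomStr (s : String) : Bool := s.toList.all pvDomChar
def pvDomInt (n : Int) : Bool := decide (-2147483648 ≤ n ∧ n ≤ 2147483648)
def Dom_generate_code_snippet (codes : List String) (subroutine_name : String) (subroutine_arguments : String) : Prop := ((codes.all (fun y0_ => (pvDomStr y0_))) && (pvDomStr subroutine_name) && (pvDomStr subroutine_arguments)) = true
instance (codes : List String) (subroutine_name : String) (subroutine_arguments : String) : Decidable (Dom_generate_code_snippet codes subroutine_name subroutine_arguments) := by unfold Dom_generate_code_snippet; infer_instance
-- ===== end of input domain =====

-- B replaces the materialised itertools.product table and per-combo enumerate passes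
-- with one recursion over the codes carrying accumulated condition/kwarg fragments (objective: alternative).


-- ===== PORT A =====
-- itertools.product([False, True], repeat=n): leftmost position varies slowest.
def pvProdRepeat (l : List Bool) : Nat → List (List Bool)
  | 0 => [[]]
  | n + 1 => l.flatMap (fun b => (pvProdRepeat l n).map (fun c => b :: c))

-- combo[i] paired with codes[i] for i, code in enumerate(codes): exact as a zip,
-- since every combo has length len(codes).
def generate_code_snippet (codes : List String) (subroutine_name : String) (subroutine_arguments : String) : String :=
  let l := [false, true]
  let iter := pvProdRepeat l codes.length
  iter.foldl (fun code_section combo =>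
    let tmp := PySem.Str.join " .and. "
      ((combo.zip codes).map (fun p => if p.1 then p.2 else ".not. " ++ p.2))
    let conditional_statement := "else if (" ++ tmp ++ ") then"
    let subroutine_kwargs := PySem.Str.join ","
      (((combo.zip codes).filter (fun p => p.1)).map
        (fun p => PySem.Str.replace p.2 "is_" "" ++ "=" ++ PySem.Str.replace p.2 "is_" ""))
    code_section ++ conditional_statement ++ "\n    call " ++ subroutine_name ++ "("
      ++ subroutine_arguments ++ "," ++ subroutine_kwargs ++ ",kout=kout)\n") ""

-- ===== PORT B =====
def pvEmit (subroutine_name subroutine_arguments : String) (conds kwargs : List String) : String :=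
  "else if (" ++ PySem.Str.join " .and. " conds ++ ") then\n    call " ++ subroutine_name
    ++ "(" ++ subroutine_arguments ++ "," ++ PySem.Str.join "," kwargs ++ ",kout=kout)\n"

def pvWalk (subroutine_name subroutine_arguments : String) :
    List String → List String → List String → String
  | [], conds, kwargs => pvEmit subroutine_name subroutine_arguments conds kwargs
  | code :: rest, conds, kwargs =>
      let stripped := PySem.Str.replace code "is_" ""
      pvWalk subroutine_name subroutine_arguments rest (conds ++ [".not. " ++ code]) kwargs
        ++ pvWalk subroutine_name subroutine_arguments rest (conds ++ [code])
            (kwargs ++ [stripped ++ "=" ++ stripped])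

def generate_code_snippet_alt (codes : List String) (subroutine_name : String) (subroutine_arguments : String) : String :=
  pvWalk subroutine_name subroutine_arguments codes [] []

-- ===== PRECONDITION & SPEC =====
def Spec_generate_code_snippet (codes : List String) (subroutine_name : String) (subroutine_arguments : String) (out : String) : Prop := out = generate_code_snippet_alt codes subroutine_name subroutine_arguments
instance (codes : List String) (subroutine_name : String) (subroutine_arguments : String) (out : String) : Decidable (Spec_generate_code_snippet codes subroutine_name subroutine_arguments out) := by unfold Spec_generate_code_snippet; infer_instance

-- ===== CLAIM (what is proved, stated in full; the proofs are below) =====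
def Claim_equal_generate_code_snippet : Prop := ∀ (codes : List String) (subroutine_name : String) (subroutine_arguments : String), Dom_generate_code_snippet codes subroutine_name subroutine_arguments → Spec_generate_code_snippet codes subroutine_name subroutine_arguments (generate_code_snippet codes subroutine_name subroutine_arguments)

-- ===== LEMMAS AND PROOFS =====

-- The per-pair condition and kwarg fragments (proof-side names for the lambdas in port A).
def pvCondTerm (p : Bool × String) : String := if p.1 then p.2 else ".not. " ++ p.2
def pvKwTerm (p : Bool × String) : String :=
  PySem.Str.replace p.2 "is_" "" ++ "=" ++ PySem.Str.replace p.2 "is_" ""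

-- Generalised loop/recursion correspondence: folding A's per-combo emission over all
-- combos of `rest`, with already-accumulated prefixes `conds`/`kwargs`, equals
-- `acc ++` B's recursive walk over `rest` with those accumulators.
theorem pvWalk_foldl (sn sa : String) (rest : List String) :
    ∀ (conds kwargs : List String) (acc : String),
    (pvProdRepeat [false, true] rest.length).foldl (fun a combo =>
      a ++ pvEmit sn sa
        (conds ++ (combo.zip rest).map pvCondTerm)
        (kwargs ++ (((combo.zip rest).filter (fun p => p.1)).map pvKwTerm))) acc
    = acc ++ pvWalk sn sa rest conds kwargs := by
  induction rest with
  | nil =>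
      intro conds kwargs acc
      simp [pvProdRepeat, pvWalk]
  | cons c cs ih =>
      intro conds kwargs acc
      have h1 : ∀ (a : String) (combo : List Bool),
          a ++ pvEmit sn sa (conds ++ (".not. " ++ c) :: (combo.zip cs).map pvCondTerm)
              (kwargs ++ ((combo.zip cs).filter (fun p => p.1)).map pvKwTerm)
        = a ++ pvEmit sn sa ((conds ++ [".not. " ++ c]) ++ (combo.zip cs).map pvCondTerm)
              (kwargs ++ ((combo.zip cs).filter (fun p => p.1)).map pvKwTerm) := by
        intro a combo; simp
      have h2 : ∀ (a : String) (combo : List Bool),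
          a ++ pvEmit sn sa (conds ++ c :: (combo.zip cs).map pvCondTerm)
              (kwargs ++ pvKwTerm (true, c) :: ((combo.zip cs).filter (fun p => p.1)).map pvKwTerm)
        = a ++ pvEmit sn sa ((conds ++ [c]) ++ (combo.zip cs).map pvCondTerm)
              ((kwargs ++ [pvKwTerm (true, c)]) ++ ((combo.zip cs).filter (fun p => p.1)).map pvKwTerm) := by
        intro a combo; simp
      simp only [List.length_cons, pvProdRepeat, List.flatMap_cons, List.flatMap_nil,
        List.append_nil, List.foldl_append, List.foldl_map, List.zip_cons_cons,
        List.map_cons, List.filter_cons, pvCondTerm, if_false, if_true,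
        Bool.false_eq_true]
      simp only [h1, h2]
      rw [ih, ih]
      simp [pvWalk, pvKwTerm, String.append_assoc]

theorem generate_code_snippet_eq (codes : List String) (sn sa : String) :
    generate_code_snippet codes sn sa = generate_code_snippet_alt codes sn sa := by
  unfold generate_code_snippet generate_code_snippet_alt
  have h := pvWalk_foldl sn sa codes [] [] ""
  simp only [List.nil_append, pvEmit,
    show pvCondTerm = (fun p : Bool × String => if p.1 then p.2 else ".not. " ++ p.2) from rfl,
    show pvKwTerm = (fun p : Bool × String =>
      PySem.Str.replace p.2 "is_" "" ++ "=" ++ PySem.Str.replace p.2 "is_" "") from rfl] at h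
  rw [show ("" : String) ++ pvWalk sn sa codes [] [] = pvWalk sn sa codes [] [] by simp] at h
  rw [← h]
  have hlit : ∀ s : String, ") then" ++ ("\n    call " ++ s) = ") then\n    call " ++ s := by
    intro s; rw [← String.append_assoc]; congr 1
  simp only [String.append_assoc, hlit]

-- ===== VERDICT (by name: the statement is the Claim_ definition above) =====
theorem generate_code_snippet_spec : Claim_equal_generate_code_snippet := by
  intro codes sn sa _
  exact generate_code_snippet_eq codes sn sa
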